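-- pv_equiv track=rewrite | github.com/riccardogibello/md_nomenclature_mapping_project | src/data_model/nomenclature_codes/emdn_code.py | get_code_level
-- ===== SOURCE A (Python) =====
-- def get_code_level(
--         emdn_code_string: str
-- ):
--     """
--     This function returns the level of the EMDN code.
--
--     :param emdn_code_string: The EMDN code string.
--
--     :return: The level of the EMDN code.
--     """
--     if emdn_code_string is None or len(emdn_code_string) == 0:
--         return -1
--     else:
--         tot_levels = 1
--         # Remove the EMDN category
--         emdn_code_string = emdn_code_string[1:]
--         # Count the number of levels composed by two digits
--         for i in range(0, len(emdn_code_string) - 1, 2):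
--             tot_levels = tot_levels + 1
--
--         return tot_levels
-- ===== SOURCE B (Python) =====
-- def get_code_level(
--         emdn_code_string: str
-- ):
--     """Level of the EMDN code, computed in closed form from the length."""
--     if emdn_code_string is None or len(emdn_code_string) == 0:
--         return -1
--     return 1 + (len(emdn_code_string) - 1) // 2
-- ===== Notes on version B (the rewrite author's own statement) =====
-- stated objective: simpler
-- what changed: Replaced the slice-then-count loop over range(0, len-1, 2) with the closed-form arithmetic 1 + (len-1)//2 derived directly from the string length.
import Mathlib
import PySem

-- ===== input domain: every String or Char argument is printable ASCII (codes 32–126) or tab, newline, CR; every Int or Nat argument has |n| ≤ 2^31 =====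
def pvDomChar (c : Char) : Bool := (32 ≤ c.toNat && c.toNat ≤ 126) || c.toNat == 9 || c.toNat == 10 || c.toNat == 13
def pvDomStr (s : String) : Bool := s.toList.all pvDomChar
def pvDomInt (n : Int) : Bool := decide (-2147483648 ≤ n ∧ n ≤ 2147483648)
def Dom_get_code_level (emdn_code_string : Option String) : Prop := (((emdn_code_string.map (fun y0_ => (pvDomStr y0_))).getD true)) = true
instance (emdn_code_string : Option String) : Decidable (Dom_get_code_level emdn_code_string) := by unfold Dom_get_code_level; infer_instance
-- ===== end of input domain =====

-- B replaces A's slice-and-count loop with the closed-form level 1 + (len-1)//2 (objective: simpler).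

-- ===== PORT A =====
def get_code_level (emdn_code_string : Option String) : Int :=
  match emdn_code_string with
  | none => -1
  | some s =>
    if PySem.Str.len s = 0 then -1
    else
      -- emdn_code_string = emdn_code_string[1:]
      let rest : List Char := PySem.List.slice s.toList (some 1) none
      -- for i in range(0, len(rest) - 1, 2): tot_levels += 1
      (PySem.List.pyRange 0 ((rest.length : Int) - 1) 2).foldl (fun tot _ => tot + 1) 1

-- ===== PORT B =====
def get_code_level_alt (emdn_code_string : Option String) : Int :=
  match emdn_code_string with
  | none => -1
  | some s =>
    if PySem.Str.len s = 0 then -1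
    else 1 + PySem.Int.floordiv (PySem.Str.len s - 1) 2

-- ===== PRECONDITION & SPEC =====
def Spec_get_code_level (emdn_code_string : Option String) (out : Int) : Prop := out = get_code_level_alt emdn_code_string
instance (emdn_code_string : Option String) (out : Int) : Decidable (Spec_get_code_level emdn_code_string out) := by unfold Spec_get_code_level; infer_instance

-- ===== CLAIM (what is proved, stated in full; the proofs are below) =====
def Claim_equal_get_code_level : Prop := ∀ (emdn_code_string : Option String), Dom_get_code_level emdn_code_string → Spec_get_code_level emdn_code_string (get_code_level emdn_code_string)

-- ===== LEMMAS AND PROOFS =====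

-- counting fold = init + length
theorem foldl_count (l : List Int) (t : Int) : l.foldl (fun tot _ => tot + 1) t = t + l.length := by
  induction l generalizing t with
  | nil => simp
  | cons x xs ih => simp [List.foldl, ih]; ring

-- ===== VERDICT (by name: the statement is the Claim_ definition above) =====
theorem get_code_level_spec : Claim_equal_get_code_level := by
  intro o _
  unfold Spec_get_code_level get_code_level get_code_level_alt
  match o with
  | none => rfl
  | some s =>
    simp only [PySem.Str.len_eq, PySem.List.slice_from_one]
    by_cases h : ((s.toList.length : Int)) = 0
    · rw [if_pos h, if_pos h]
    · rw [if_neg h, if_neg h]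
      rw [foldl_count, PySem.List.pyRange_of_pos 0 _ (by norm_num : (0:Int) < 2),
          PySem.Int.floordiv_eq_ediv_of_pos (by norm_num : (0:Int) < 2)]
      simp only [List.length_map, List.length_range, List.length_tail]
      split_ifs with hc <;> omega
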